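-- pv_equiv track=rewrite | github.com/colinmacgiolla/advent-of-code-2025 | day-06/main.py | part_2
-- ===== SOURCE A (Python) =====
-- def part_2(data):
--     operands = []
--     results = []
--
--     transposed = [list(row) for row in zip(*data)]
--
--     result = 0
--     for line in transposed:
--         if not all(c==' ' for c in line[:-1]):
--             operands.append(int("".join(map(str, line[:-1]))))
--             if line[-1] != ' ':
--                 operator = line[-1]
--         else:
--             for entry in operands:
--                 if operator == '+':
--                     result += entry
--                 else:
--                     if result == 0:
--                         result = 1
--                     result = result * entry
--
--             results.append(result)
--             operands.clear()
--             result = 0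
--
--     for entry in operands:
--         if operator == '+':
--             result += entry
--         else:
--             if result == 0:
--                 result = 1
--             result = result * entry
--
--     results.append(result)
--
--     return sum(results)
-- ===== SOURCE B (Python) =====
-- def _is_sep(c):
--     return all(ch == ' ' for ch in c[:-1])
--
--
-- def _split(cols):
--     """Partition the column list on separator columns: one group per separator
--     plus a trailing group (groups may be empty)."""
--     if not cols:
--         return [[]]
--     first, rest = cols[0], cols[1:]
--     sub = _split(rest)
--     if _is_sep(first):
--         return [[]] + sub
--     return [[first] + sub[0]] + sub[1:]
--
--
-- def part_2(data):
--     cols = [list(col) for col in zip(*data)]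
--     total = 0
--     op = None
--     for g in _split(cols):
--         vals = [int("".join(c[:-1])) for c in g]
--         for c in g:
--             if c[-1] != ' ':
--                 op = c[-1]
--         if op == '+':
--             total += sum(vals)
--         else:
--             p = 0
--             for v in vals:
--                 p = (1 if p == 0 else p) * v
--             total += p
--     return total
-- ===== Notes on version B (the rewrite author's own statement) =====
-- stated objective: alternative
-- what changed: B first partitions the transposed columns into separator-delimited groups by a recursive split, then folds each group's parsed operands with the running operator, instead of A's single pass that interleaves operand accumulation, flushing and a results list.
import Mathlib
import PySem

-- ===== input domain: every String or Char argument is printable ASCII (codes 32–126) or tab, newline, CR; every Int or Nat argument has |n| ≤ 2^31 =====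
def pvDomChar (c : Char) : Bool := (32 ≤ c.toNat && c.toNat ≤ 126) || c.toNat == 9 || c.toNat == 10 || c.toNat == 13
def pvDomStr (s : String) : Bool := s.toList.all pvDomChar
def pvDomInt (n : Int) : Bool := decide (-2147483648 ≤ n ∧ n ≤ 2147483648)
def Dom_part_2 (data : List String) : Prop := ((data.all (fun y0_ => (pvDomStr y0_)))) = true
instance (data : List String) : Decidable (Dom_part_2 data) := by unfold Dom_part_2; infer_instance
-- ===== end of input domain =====

-- B re-decomposes A's single interleaved pass as: split the transposed columns into
-- separator-delimited groups, then fold each group with the running operator ("alternative").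

-- shared helper: zip(*data) (both Pythons transpose the rows the same way)
def pvTranspose (data : List String) : List (List Char) :=
  let rows := data.map String.toList
  match (rows.map List.length).min? with
  | none => []
  | some n => (List.range n).map (fun i => rows.map (fun r => r.getD i ' '))

-- ===== PORT A =====
def part_2 (data : List String) : Int :=
  let transposed := pvTranspose data
  let st := transposed.foldl (fun (st : List Int × List Int × Int × Option Char) line =>
      let operands := st.1
      let results := st.2.1
      let result := st.2.2.1
      let op := st.2.2.2
      if (line.dropLast.all (fun ch => ch == ' ')) = false then
        let operands := operands ++ [(PySem.Int.ofChars? line.dropLast).getD 0]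
        let op := match PySem.List.pyGet? line (-1) with
          | some ch => if ch = ' ' then op else some ch
          | none => op
        (operands, results, result, op)
      else
        let result := operands.foldl (fun r e =>
            if op = some '+' then r + e else (if r = 0 then 1 else r) * e) result
        (([] : List Int), results ++ [result], (0 : Int), op))
    (([] : List Int), ([] : List Int), (0 : Int), (none : Option Char))
  let result := st.1.foldl (fun r e =>
      if st.2.2.2 = some '+' then r + e else (if r = 0 then 1 else r) * e) st.2.2.1
  (st.2.1 ++ [result]).sum

-- ===== PORT B =====
def pvIsSep (c : List Char) : Bool := c.dropLast.all (fun ch => ch == ' ')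

def pvSplitCols : List (List Char) → List (List (List Char))
  | [] => [[]]
  | c :: rest =>
    let sub := pvSplitCols rest
    if pvIsSep c then [] :: sub
    else (c :: sub.headD []) :: sub.tail

def pvParse (c : List Char) : Int := (PySem.Int.ofChars? c.dropLast).getD 0

def pvUpdOp (op : Option Char) (g : List (List Char)) : Option Char :=
  g.foldl (fun o c => match PySem.List.pyGet? c (-1) with
    | some ch => if ch = ' ' then o else some ch
    | none => o) op

def pvProdQuirk (vals : List Int) : Int :=
  vals.foldl (fun p v => (if p = 0 then 1 else p) * v) 0

def part_2_alt (data : List String) : Int :=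
  let cols := pvTranspose data
  ((pvSplitCols cols).foldl (fun (st : Int × Option Char) g =>
      let vals := g.map pvParse
      let op := pvUpdOp st.2 g
      let t := if op = some '+' then st.1 + vals.sum else st.1 + pvProdQuirk vals
      (t, op)) ((0 : Int), (none : Option Char))).1

-- ===== PRECONDITION & SPEC =====
-- does the column's last char (the operator row) carry a non-blank operator?
def pvLastOp (c : List Char) : Bool :=
  match PySem.List.pyGet? c (-1) with
  | some ch => ch != ' '
  | none => false

-- Pre_ excludes exactly the inputs where Python A raises: an operand column whose joined
-- prefix is not a valid int literal (ValueError), or a first run of operand columns that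
-- contains no operator character, so that A's flush reads the unassigned 'operator'
-- (UnboundLocalError).
def Pre_part_2 (data : List String) : Prop :=
  (∀ c ∈ pvTranspose data, pvIsSep c = false → (PySem.Int.ofChars? c.dropLast).isSome = true)
  ∧ (∀ j < (pvTranspose data).length, pvIsSep ((pvTranspose data).getD j []) = false →
      (∀ i, i < j → pvIsSep ((pvTranspose data).getD i []) = true) →
      ∃ k < (pvTranspose data).length, j ≤ k ∧
        (∀ i, j ≤ i → i ≤ k → pvIsSep ((pvTranspose data).getD i []) = false) ∧
        pvLastOp ((pvTranspose data).getD k []) = true)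
instance (data : List String) : Decidable (Pre_part_2 data) := by unfold Pre_part_2; infer_instance

def pvWitness_part_2 : List String := ["12 34  5", "+   *   "]

def Spec_part_2 (data : List String) (out : Int) : Prop := out = part_2_alt data
instance (data : List String) (out : Int) : Decidable (Spec_part_2 data out) := by unfold Spec_part_2; infer_instance

-- ===== CLAIM (what is proved, stated in full; the proofs are below) =====
def Claim_equal_part_2 : Prop := ∀ (data : List String), Dom_part_2 data → Pre_part_2 data → Spec_part_2 data (part_2 data)

-- ===== LEMMAS AND PROOFS =====

-- A's flush body / B's per-group evaluation, as used in the proofs.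
def pvFA (op : Option Char) : Int → Int → Int := fun r e =>
  if op = some '+' then r + e else (if r = 0 then 1 else r) * e

def pvEvalG (op : Option Char) (vals : List Int) : Int :=
  if op = some '+' then vals.sum else pvProdQuirk vals

def pvRunG (op : Option Char) (pend : List Int) : List (List (List Char)) → Int
  | [] => 0
  | g :: gs =>
    let op' := pvUpdOp op g
    pvEvalG op' (pend ++ g.map pvParse) + pvRunG op' [] gs

lemma foldl_add_sum (vals : List Int) : ∀ r : Int, vals.foldl (fun a b => a + b) r = r + vals.sum := by
  induction vals with
  | nil => simp
  | cons v vs ih => intro r; simp [List.foldl_cons, ih, List.sum_cons]; ring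

lemma flush_eval (op : Option Char) (vals : List Int) :
    vals.foldl (pvFA op) 0 = pvEvalG op vals := by
  by_cases h : op = some '+'
  · simp only [pvEvalG, if_pos h]
    have : pvFA op = fun a b => a + b := by funext a b; simp [pvFA, h]
    rw [this, foldl_add_sum]; ring
  · simp only [pvEvalG, if_neg h, pvProdQuirk]
    congr 1; funext a b; simp [pvFA, h]

lemma splitCols_ne_nil (cols : List (List Char)) : pvSplitCols cols ≠ [] := by
  cases cols with
  | nil => simp [pvSplitCols]
  | cons c rest => simp only [pvSplitCols]; split <;> simp

lemma updOp_nil (op : Option Char) : pvUpdOp op [] = op := rfl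

lemma updOp_cons (op : Option Char) (c : List Char) (g : List (List Char)) :
    pvUpdOp op (c :: g) = pvUpdOp (match PySem.List.pyGet? c (-1) with
      | some ch => if ch = ' ' then op else some ch
      | none => op) g := rfl

def pvStepA : (List Int × List Int × Int × Option Char) → List Char → (List Int × List Int × Int × Option Char) :=
  fun st line =>
    let operands := st.1
    let results := st.2.1
    let result := st.2.2.1
    let op := st.2.2.2
    if (line.dropLast.all (fun ch => ch == ' ')) = false then
      let operands := operands ++ [(PySem.Int.ofChars? line.dropLast).getD 0]
      let op := match PySem.List.pyGet? line (-1) with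
        | some ch => if ch = ' ' then op else some ch
        | none => op
      (operands, results, result, op)
    else
      let result := operands.foldl (pvFA op) result
      (([] : List Int), results ++ [result], (0 : Int), op)

def pvFinal (st : List Int × List Int × Int × Option Char) : Int :=
  (st.2.1 ++ [st.1.foldl (pvFA st.2.2.2) st.2.2.1]).sum

-- A's main loop, flushed and summed, equals the grouped evaluation.
lemma foldA_runG (cols : List (List Char)) : ∀ (op : Option Char) (pend res : List Int),
    pvFinal (cols.foldl pvStepA (pend, res, 0, op))
      = res.sum + pvRunG op pend (pvSplitCols cols) := by
  induction cols with
  | nil =>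
    intro op pend res
    simp only [List.foldl_nil, pvSplitCols, pvRunG, updOp_nil, pvFinal]
    rw [flush_eval]
    simp [List.sum_append]
  | cons c rest ih =>
    intro op pend res
    by_cases hsep : (c.dropLast.all (fun ch => ch == ' ')) = true
    · -- separator column: flush
      have hs : ¬ ((c.dropLast.all (fun ch => ch == ' ')) = false) := by simp [hsep]
      simp only [List.foldl_cons, pvStepA, if_neg hs]
      rw [ih op [] (res ++ [pend.foldl (pvFA op) 0])]
      have hsplit : pvSplitCols (c :: rest) = [] :: pvSplitCols rest := by
        simp [pvSplitCols, pvIsSep, hsep]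
      rw [hsplit]
      simp only [pvRunG, updOp_nil, List.map_nil, List.append_nil, List.sum_append,
        List.sum_cons, List.sum_nil, flush_eval]
      ring
    · -- operand column
      have hns : (c.dropLast.all (fun ch => ch == ' ')) = false := by
        cases h : c.dropLast.all (fun ch => ch == ' ') <;> simp_all
      simp only [List.foldl_cons, pvStepA, if_pos hns]
      rw [ih _ (pend ++ [(PySem.Int.ofChars? c.dropLast).getD 0]) res]
      congr 1
      obtain ⟨g, gs, hgg⟩ : ∃ g gs, pvSplitCols rest = g :: gs := by
        cases hr : pvSplitCols rest with
        | nil => exact absurd hr (splitCols_ne_nil rest)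
        | cons g gs => exact ⟨g, gs, rfl⟩
      have hsplit : pvSplitCols (c :: rest) = (c :: g) :: gs := by
        simp [pvSplitCols, pvIsSep, hns, hgg]
      rw [hsplit, hgg]
      simp only [pvRunG, updOp_cons, List.map_cons]
      simp [pvParse]

theorem ab_equal (data : List String) : part_2 data = part_2_alt data := by
  have hA := foldA_runG (pvTranspose data) none [] []
  simp only [List.sum_nil, zero_add] at hA
  have hA2 : part_2 data = pvRunG none [] (pvSplitCols (pvTranspose data)) := by
    rw [← hA]; rfl
  -- B's fold over groups equals pvRunG
  have hB : ∀ (gs : List (List (List Char))) (t : Int) (op : Option Char),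
      (gs.foldl (fun (st : Int × Option Char) g =>
        let vals := g.map pvParse
        let op := pvUpdOp st.2 g
        let t := if op = some '+' then st.1 + vals.sum else st.1 + pvProdQuirk vals
        (t, op)) (t, op)).1 = t + pvRunG op [] gs := by
    intro gs
    induction gs with
    | nil => intro t op; simp [pvRunG]
    | cons g gs ih =>
      intro t op
      simp only [List.foldl_cons, pvRunG, List.nil_append]
      rw [ih]
      simp only [pvEvalG]
      by_cases h : pvUpdOp op g = some '+' <;> simp [h] <;> ring
  rw [hA2]
  show _ = ((pvSplitCols (pvTranspose data)).foldl _ ((0 : Int), (none : Option Char))).1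
  rw [hB]
  simp

-- ===== VERDICT (by name: the statement is the Claim_ definition above) =====
theorem part_2_spec : Claim_equal_part_2 := by
  intro data _ _
  unfold Spec_part_2
  exact ab_equal data
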